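-- pv_equiv track=rewrite | github.com/wg-lux/agl_anonymizer_pipeline | agl_anonymizer_pipeline/ocr_pipeline_manager.py | combine_boxes
-- ===== SOURCE A (Python) =====
-- def combine_boxes(text_with_boxes):
--     if not text_with_boxes:
--         return text_with_boxes
--
--     # Sort the boxes by (startY, startX)
--     text_with_boxes = sorted(text_with_boxes, key=lambda x: (x[1][1], x[1][0]))
--
--     merged_text_with_boxes = [text_with_boxes[0]]
--
--     for current in text_with_boxes[1:]:
--         last = merged_text_with_boxes[-1]
--
--         # Unpack current and last
--         current_text, current_box = current
--         last_text, last_box = last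
--
--         (last_startX, last_startY, last_endX, last_endY) = last_box
--         (current_startX, current_startY, current_endX, current_endY) = current_box
--
--         # Check if the boxes are on the same line and close enough to merge
--         if last_startY == current_startY and (current_startX - last_endX) <= 10:
--             # Merge the boxes
--             merged_box = (min(last_startX, current_startX), last_startY, max(last_endX, current_endX), last_endY)
--             # Concatenate the text
--             merged_text = last_text + ' ' + current_text
--             # Update the last entry in the merged list
--             merged_text_with_boxes[-1] = (merged_text, merged_box)
--         else:
--             # Add the current box as a new entry
--             merged_text_with_boxes.append(current)
--
--     return merged_text_with_boxes
-- ===== SOURCE B (Python) =====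
-- def _chain_len(y, reach, boxes):
--     """Length of the prefix of boxes that chains onto a merged box on line y
--     currently reaching to x = reach (gap <= 10)."""
--     n = 0
--     for _, (sx, sy, ex, _ey) in boxes:
--         if sy != y or sx - reach > 10:
--             break
--         reach = max(reach, ex)
--         n += 1
--     return n
--
--
-- def combine_boxes(text_with_boxes):
--     if not text_with_boxes:
--         return text_with_boxes
--     boxes = sorted(text_with_boxes, key=lambda b: (b[1][1], b[1][0]))
--     out = []
--     while boxes:
--         _t0, (_sx0, sy0, ex0, ey0) = boxes[0]
--         n = _chain_len(sy0, ex0, boxes[1:])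
--         seg, boxes = boxes[:n + 1], boxes[n + 1:]
--         out.append((' '.join(t for t, _ in seg),
--                     (min(b[1][0] for b in seg), sy0,
--                      max(b[1][2] for b in seg), ey0)))
--     return out
-- ===== Notes on version B (the rewrite author's own statement) =====
-- stated objective: alternative
-- what changed: Instead of A's single fold that keeps re-reading and rewriting the last entry of the growing output list, B first measures the length of the next chainable prefix with a pure counting helper (_chain_len, tracking only the line y and the running right edge), then slices off that whole segment and aggregates it in one shot with ' '.join / min() / max(), repeating until the sorted list is exhausted.
import Mathlib
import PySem

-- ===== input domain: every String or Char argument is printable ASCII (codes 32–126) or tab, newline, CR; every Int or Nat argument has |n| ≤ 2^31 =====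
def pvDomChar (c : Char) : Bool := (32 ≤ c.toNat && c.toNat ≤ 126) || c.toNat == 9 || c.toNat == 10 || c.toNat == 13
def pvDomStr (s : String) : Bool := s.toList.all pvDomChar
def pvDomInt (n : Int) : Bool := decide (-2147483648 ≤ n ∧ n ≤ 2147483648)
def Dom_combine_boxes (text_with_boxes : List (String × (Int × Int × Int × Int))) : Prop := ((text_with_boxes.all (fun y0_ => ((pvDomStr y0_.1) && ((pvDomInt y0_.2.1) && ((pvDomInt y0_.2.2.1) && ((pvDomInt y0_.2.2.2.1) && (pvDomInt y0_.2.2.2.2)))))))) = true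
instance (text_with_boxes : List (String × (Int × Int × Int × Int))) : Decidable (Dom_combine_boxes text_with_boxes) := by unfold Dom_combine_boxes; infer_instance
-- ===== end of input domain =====

-- B replaces A's single fold that rewrites the last output entry with a staged scheme: after the
-- same sort, it repeatedly measures the length of the next chainable prefix (a pure counting pass
-- that keeps only the line y and the running right edge), then aggregates that whole slice at once
-- with ' '.join / min / max; objective: alternative decomposition (same cost).

-- ===== PORT A =====
-- one step of A's loop body; acc is never empty, so the getLastD default is never used
def pvStepA (acc : List (String × (Int × Int × Int × Int))) (current : String × (Int × Int × Int × Int)) :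
    List (String × (Int × Int × Int × Int)) :=
  let last := acc.getLastD current
  if last.2.2.1 = current.2.2.1 ∧ current.2.1 - last.2.2.2.1 ≤ 10 then
    acc.dropLast ++ [(last.1 ++ " " ++ current.1,
      (min last.2.1 current.2.1, last.2.2.1, max last.2.2.2.1 current.2.2.2.1, last.2.2.2.2))]
  else
    acc ++ [current]

def combine_boxes (text_with_boxes : List (String × (Int × Int × Int × Int))) : List (String × (Int × Int × Int × Int)) :=
  -- if not text_with_boxes: return text_with_boxes  — sorted list is empty iff input is empty
  match PySem.List.sorted2 text_with_boxes (fun x => x.2.2.1) (fun x => x.2.1) with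
  | [] => text_with_boxes
  | first :: rest => rest.foldl pvStepA [first]

-- ===== PORT B =====
-- port of _chain_len: the for-loop with break, as structural recursion over boxes
def pvChainLen (y reach : Int) : List (String × (Int × Int × Int × Int)) → Nat
  | [] => 0
  | b :: bs =>
    if b.2.2.1 ≠ y ∨ b.2.1 - reach > 10 then 0
    else pvChainLen y (max reach b.2.2.2.1) bs + 1

-- the while-loop of B: slice off one chain, aggregate it with join/min/max, recurse on the rest;
-- seg is nonempty by construction, so the getD defaults of min?/max? are never used
def pvMergeLoop : List (String × (Int × Int × Int × Int)) → List (String × (Int × Int × Int × Int))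
  | [] => []
  | b :: bs =>
    let n := pvChainLen b.2.2.1 b.2.2.2.1 bs
    let seg := (b :: bs).take (n + 1)
    (PySem.Str.join " " (seg.map Prod.fst),
      ((PySem.List.min? (seg.map fun x => x.2.1) (fun v => v)).getD 0, b.2.2.1,
       (PySem.List.max? (seg.map fun x => x.2.2.2.1) (fun v => v)).getD 0, b.2.2.2.2))
      :: pvMergeLoop ((b :: bs).drop (n + 1))
termination_by l => l.length
decreasing_by simp [List.length_drop]

def combine_boxes_alt (text_with_boxes : List (String × (Int × Int × Int × Int))) : List (String × (Int × Int × Int × Int)) :=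
  match text_with_boxes with
  | [] => text_with_boxes
  | _ :: _ => pvMergeLoop (PySem.List.sorted2 text_with_boxes (fun x => x.2.2.1) (fun x => x.2.1))

-- ===== PRECONDITION & SPEC =====
def Spec_combine_boxes (text_with_boxes : List (String × (Int × Int × Int × Int))) (out : List (String × (Int × Int × Int × Int))) : Prop := out = combine_boxes_alt text_with_boxes
instance (text_with_boxes : List (String × (Int × Int × Int × Int))) (out : List (String × (Int × Int × Int × Int))) : Decidable (Spec_combine_boxes text_with_boxes out) := by unfold Spec_combine_boxes; infer_instance

-- ===== CLAIM (what is proved, stated in full; the proofs are below) =====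
def Claim_equal_combine_boxes : Prop := ∀ (text_with_boxes : List (String × (Int × Int × Int × Int))), Dom_combine_boxes text_with_boxes → Spec_combine_boxes text_with_boxes (combine_boxes text_with_boxes)

-- ===== LEMMAS AND PROOFS =====

-- merged entry built by A's in-place rewrite
def pvMerge (last c : String × (Int × Int × Int × Int)) : String × (Int × Int × Int × Int) :=
  (last.1 ++ " " ++ c.1, (min last.2.1 c.2.1, last.2.2.1, max last.2.2.2.1 c.2.2.2.1, last.2.2.2.2))

-- recursive characterisation of A's flat scan (state: the pending last entry)
def pvScanA : (String × (Int × Int × Int × Int)) → List (String × (Int × Int × Int × Int)) → List (String × (Int × Int × Int × Int))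
  | last, [] => [last]
  | last, c :: cs =>
    if last.2.2.1 = c.2.2.1 ∧ c.2.1 - last.2.2.2.1 ≤ 10 then pvScanA (pvMerge last c) cs
    else last :: pvScanA c cs

def pvScanATop : List (String × (Int × Int × Int × Int)) → List (String × (Int × Int × Int × Int))
  | [] => []
  | h :: t => pvScanA h t

theorem pvFoldA_eq_scanA (cs : List (String × (Int × Int × Int × Int)))
    (acc : List (String × (Int × Int × Int × Int))) (last : String × (Int × Int × Int × Int)) :
    cs.foldl pvStepA (acc ++ [last]) = acc ++ pvScanA last cs := by
  induction cs generalizing acc last with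
  | nil => simp [pvScanA]
  | cons c cs ih =>
    simp only [List.foldl_cons, pvScanA]
    have hstep : pvStepA (acc ++ [last]) c =
        if last.2.2.1 = c.2.2.1 ∧ c.2.1 - last.2.2.2.1 ≤ 10 then acc ++ [pvMerge last c]
        else (acc ++ [last]) ++ [c] := by
      simp [pvStepA, pvMerge]
    rw [hstep]
    by_cases h : last.2.2.1 = c.2.2.1 ∧ c.2.1 - last.2.2.2.1 ≤ 10
    · simp only [if_pos h]; exact ih acc (pvMerge last c)
    · simp only [if_neg h]
      rw [ih (acc ++ [last]) c]
      simp

theorem pvA_eq_scanATop (t : List (String × (Int × Int × Int × Int))) :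
    combine_boxes t = pvScanATop (PySem.List.sorted2 t (fun x => x.2.2.1) (fun x => x.2.1)) := by
  unfold combine_boxes
  cases hs : PySem.List.sorted2 t (fun x => x.2.2.1) (fun x => x.2.1) with
  | nil =>
    have hperm := PySem.List.sorted2_perm (xs := t) (k1 := fun x => x.2.2.1) (k2 := fun x => x.2.1) (rev := false)
    rw [hs] at hperm
    rw [(List.Perm.nil_eq hperm).symm]
    rfl
  | cons h rest =>
    show rest.foldl pvStepA [h] = pvScanA h rest
    have hA := pvFoldA_eq_scanA rest [] h
    simpa using hA

-- ' '.join swallows an already-joined head: join " " ((x ++ " " ++ y) :: r) = join " " (x :: y :: r)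
theorem pvJoinMergeHead (x y : String) (rest : List String) :
    PySem.Str.join " " ((x ++ " " ++ y) :: rest) = PySem.Str.join " " (x :: y :: rest) := by
  apply String.toList_inj.mp
  simp only [PySem.Str.toList_join, List.map_cons]
  cases rest with
  | nil => simp [PySem.Chars.join, List.intercalate]
  | cons r rs =>
    simp [PySem.Chars.join, List.intercalate, List.intersperse]

-- ' '.join of a singleton
theorem pvJoinSingleton (x : String) : PySem.Str.join " " [x] = x := by
  apply String.toList_inj.mp
  simp [PySem.Str.toList_join, PySem.Chars.join, List.intercalate]

-- the fold of A's merges over a slice equals B's one-shot aggregation of that slice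
theorem pvFoldMerge (l : List (String × (Int × Int × Int × Int))) (b : String × (Int × Int × Int × Int)) :
    l.foldl pvMerge b =
      (PySem.Str.join " " ((b :: l).map Prod.fst),
        ((l.map fun x => x.2.1).foldl min b.2.1, b.2.2.1,
         (l.map fun x => x.2.2.2.1).foldl max b.2.2.2.1, b.2.2.2.2)) := by
  induction l generalizing b with
  | nil =>
    obtain ⟨t, sx, sy, ex, ey⟩ := b
    simp [pvJoinSingleton]
  | cons c l ih =>
    simp only [List.foldl_cons, List.map_cons]
    rw [ih (pvMerge b c)]
    simp only [pvMerge, List.map_cons]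
    rw [pvJoinMergeHead]

-- A's scan from a pending entry e splits: fold e through the chainable prefix, then restart
theorem pvScanA_chain (bs : List (String × (Int × Int × Int × Int))) (e : String × (Int × Int × Int × Int)) :
    pvScanA e bs =
      (bs.take (pvChainLen e.2.2.1 e.2.2.2.1 bs)).foldl pvMerge e ::
        pvScanATop (bs.drop (pvChainLen e.2.2.1 e.2.2.2.1 bs)) := by
  induction bs generalizing e with
  | nil => simp [pvScanA, pvChainLen, pvScanATop]
  | cons c cs ih =>
    by_cases h : e.2.2.1 = c.2.2.1 ∧ c.2.1 - e.2.2.2.1 ≤ 10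
    · have hc : ¬ (c.2.2.1 ≠ e.2.2.1 ∨ c.2.1 - e.2.2.2.1 > 10) := by
        rcases h with ⟨h1, h2⟩
        simp [h1, h2, not_lt]
      rw [show pvScanA e (c :: cs) = pvScanA (pvMerge e c) cs from by
        simp [pvScanA, h]]
      rw [show pvChainLen e.2.2.1 e.2.2.2.1 (c :: cs)
            = pvChainLen e.2.2.1 (max e.2.2.2.1 c.2.2.2.1) cs + 1 from by
        simp [pvChainLen, hc]]
      have he : (pvMerge e c).2.2.1 = e.2.2.1 := rfl
      have hr : (pvMerge e c).2.2.2.1 = max e.2.2.2.1 c.2.2.2.1 := rfl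
      rw [List.take_succ_cons, List.drop_succ_cons, List.foldl_cons]
      have := ih (pvMerge e c)
      rw [he, hr] at this
      exact this
    · have hc : (c.2.2.1 ≠ e.2.2.1 ∨ c.2.1 - e.2.2.2.1 > 10) := by
        by_contra hcon
        rw [not_or] at hcon
        obtain ⟨h1, h2⟩ := hcon
        rw [not_not] at h1
        exact h ⟨h1.symm, by omega⟩
      rw [show pvChainLen e.2.2.1 e.2.2.2.1 (c :: cs) = 0 from by
        simp [pvChainLen, hc]]
      simp only [pvScanA, if_neg h, List.take_zero, List.drop_zero, List.foldl_nil]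
      rfl

-- B's one-shot slice aggregate = the fold of A's merges over that slice
theorem pvAgg_eq (b : String × (Int × Int × Int × Int)) (bs : List (String × (Int × Int × Int × Int))) (n : Nat) :
    (PySem.Str.join " " (((b :: bs).take (n + 1)).map Prod.fst),
      ((PySem.List.min? (((b :: bs).take (n + 1)).map fun x => x.2.1) (fun v => v)).getD 0, b.2.2.1,
       (PySem.List.max? (((b :: bs).take (n + 1)).map fun x => x.2.2.2.1) (fun v => v)).getD 0, b.2.2.2.2))
      = (bs.take n).foldl pvMerge b := by
  rw [List.take_succ_cons, pvFoldMerge]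
  simp only [List.map_cons]
  rw [PySem.List.min?_id_cons, PySem.List.max?_id_cons]
  rfl

-- A's scan equals B's measure-slice-aggregate loop
theorem pvScanATop_eq_mergeLoop (s : List (String × (Int × Int × Int × Int))) :
    pvScanATop s = pvMergeLoop s := by
  induction s using pvMergeLoop.induct with
  | case1 => simp [pvScanATop, pvMergeLoop]
  | case2 b bs n ih =>
    simp only [pvMergeLoop]
    rw [show pvScanATop (b :: bs) = pvScanA b bs from rfl, pvScanA_chain bs b, pvAgg_eq]
    rw [List.drop_succ_cons] at ih
    rw [ih, List.drop_succ_cons]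

-- ===== VERDICT (by name: the statement is the Claim_ definition above) =====
theorem combine_boxes_spec : Claim_equal_combine_boxes := by
  intro t _
  unfold Spec_combine_boxes
  cases t with
  | nil => rfl
  | cons a as =>
    show combine_boxes (a :: as) = pvMergeLoop (PySem.List.sorted2 (a :: as) (fun x => x.2.2.1) (fun x => x.2.1))
    rw [pvA_eq_scanATop, pvScanATop_eq_mergeLoop]
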